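-- pv_equiv track=rewrite | github.com/MrBrantCode/unitest_baseline | mut_generate/mist_train_taco/taco_9753/solution.py | calculate_eaten_pieces
-- ===== SOURCE A (Python) =====
-- from bisect import bisect
--
-- def calculate_eaten_pieces(n, q, actions):
--     was = set()
--     all = [0] * (2 * q)
--     for i in range(q):
--         (x, y, t) = actions[i]
--         all[2 * i] = x
--         all[2 * i + 1] = y
--     all.sort()
--     sz = 2 * q
--     V = [0] * (2 * sz)
--     H = [0] * (2 * sz)
--
--     results = []
--     for (x, y, t) in actions:
--         if (x, y) in was:
--             results.append(0)
--         else: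
--             was.add((x, y))
--             if t == 'L':
--                 TA = H
--                 TB = V
--             else:
--                 (x, y) = (y, x)
--                 TA = V
--                 TB = H
--             v = bisect(all, y) - 1 + sz
--             r = 0
--             while v > 0:
--                 r = max(r, TA[v])
--                 v //= 2
--             c = x - r
--             results.append(c)
--             r = bisect(all, x) - 1 + sz
--             l = bisect(all, x - c) + sz
--             while l <= r:
--                 if l % 2 == 1:
--                     TB[l] = max(TB[l], y)
--                 if r % 2 == 0:
--                     TB[r] = max(TB[r], y)
--                 l = (l + 1) // 2
--                 r = (r - 1) // 2
--     return results
-- ===== SOURCE B (Python) =====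
-- def calculate_eaten_pieces(n, q, actions):
--     # No segment tree and no sort: keep, per axis, the plain list of range-max
--     # updates already performed (stored as half-open rank intervals, where
--     # rank(v) = how many of the first q actions' coordinates are <= v, i.e.
--     # bisect_right of v in the sorted coordinate array) and answer each point
--     # query by a linear scan over that list.
--     coords = []
--     for i in range(q):
--         x, y, t = actions[i]
--         coords.append(x)
--         coords.append(y)
--
--     def rank(v):
--         r = 0
--         for c in coords:
--             if c <= v:
--                 r += 1
--         return r
--
--     was = set()
--     upd_v = []
--     upd_h = []
--     results = []
--     for (x, y, t) in actions:
--         if (x, y) in was: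
--             results.append(0)
--             continue
--         was.add((x, y))
--         if t == 'L':
--             src, dst = upd_h, upd_v
--         else:
--             x, y = y, x
--             src, dst = upd_v, upd_h
--         ry = rank(y)
--         r = 0
--         for rlo, rhi, val in src:
--             if rlo < ry <= rhi and val > r:
--                 r = val
--         c = x - r
--         results.append(c)
--         dst.append((rank(x - c), rank(x), y))
--     return results
-- ===== Notes on version B (the rewrite author's own statement) =====
-- stated objective: alternative
-- what changed: Replaces the sort + coordinate-compressed iterative segment trees (leaf-to-root point query, bottom-up range-max update) by a tree-free simulation: per axis a plain list of the range-max updates performed so far, stored as half-open rank intervals (rank = count of first-q coordinates <= v, computed by a linear count instead of sort+bisect), with each point query answered by a linear scan of that list.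
-- outside the precondition, e.g. on calculate_eaten_pieces(0, 1, [(3, 1, 'L'), (-3, -1, 'U')]): A returns [3, -2], B returns [3, -1]; on calculate_eaten_pieces(0, 2, [(1, 1, 'L')]): A raises IndexError, B raises IndexError
import Mathlib
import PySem

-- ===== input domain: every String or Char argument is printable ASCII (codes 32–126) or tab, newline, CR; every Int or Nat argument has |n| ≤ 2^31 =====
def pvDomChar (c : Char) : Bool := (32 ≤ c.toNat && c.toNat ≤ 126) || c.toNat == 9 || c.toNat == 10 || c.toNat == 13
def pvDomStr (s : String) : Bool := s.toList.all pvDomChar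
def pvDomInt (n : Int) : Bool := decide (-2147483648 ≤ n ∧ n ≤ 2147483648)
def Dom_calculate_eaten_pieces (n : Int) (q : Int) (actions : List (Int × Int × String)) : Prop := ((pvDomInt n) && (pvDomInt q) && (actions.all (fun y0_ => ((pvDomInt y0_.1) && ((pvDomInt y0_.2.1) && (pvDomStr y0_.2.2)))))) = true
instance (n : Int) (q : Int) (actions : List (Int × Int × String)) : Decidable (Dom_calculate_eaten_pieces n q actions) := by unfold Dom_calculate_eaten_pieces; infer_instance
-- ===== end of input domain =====

-- B replaces A's sort + two coordinate-compressed iterative segment trees by a tree-free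
-- linear-scan simulation over stored rank-interval updates (objective: alternative; return
-- value only — neither program's caller can observe the internal state).

-- ===== PORT A =====
-- while v > 0: r = max(r, TA[v]); v //= 2      (leaf-to-root point query)
def pvQueryLoop (TA : List Int) (v : Int) (r : Int) : Int :=
  if 0 < v then
    pvQueryLoop TA (PySem.Int.floordiv v 2) (max r (PySem.List.pyGetD TA v 0))
  else r
termination_by v.toNat
decreasing_by rw [PySem.Int.floordiv_eq_ediv_of_pos (by norm_num)]; omega

-- if l % 2 == 1: TB[l] = max(TB[l], y)
def pvMark1 (TB : List Int) (l y : Int) : List Int :=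
  if PySem.Int.mod l 2 = 1 then PySem.List.pySetD TB l (max (PySem.List.pyGetD TB l 0) y) else TB

-- if r % 2 == 0: TB[r] = max(TB[r], y)
def pvMark2 (TB : List Int) (r y : Int) : List Int :=
  if PySem.Int.mod r 2 = 0 then PySem.List.pySetD TB r (max (PySem.List.pyGetD TB r 0) y) else TB

-- while l <= r: …; l = (l + 1) // 2; r = (r - 1) // 2      (bottom-up range chmax)
def pvMarkLoop (TB : List Int) (l r y : Int) : List Int :=
  if h : l ≤ r then
    pvMarkLoop (pvMark2 (pvMark1 TB l y) r y)
      (PySem.Int.floordiv (l + 1) 2) (PySem.Int.floordiv (r - 1) 2) y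
  else TB
termination_by (r - l + 2).toNat
decreasing_by
  rw [PySem.Int.floordiv_eq_ediv_of_pos (by norm_num), PySem.Int.floordiv_eq_ediv_of_pos (by norm_num)]
  omega

-- all = [0]*(2*q); for i in range(q): all[2*i] = x; all[2*i+1] = y
-- (actions[i] raises IndexError in Python when i ≥ len(actions): those inputs are outside Pre_)
def pvBuildAll (q : Int) (actions : List (Int × Int × String)) : List Int :=
  (PySem.List.pyRange 0 q 1).foldl
    (fun a i =>
      let act := PySem.List.pyGetD actions i (0, 0, "")
      PySem.List.pySetD (PySem.List.pySetD a (2 * i) act.1) (2 * i + 1) act.2.1)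
    (List.replicate (2 * q).toNat 0)

-- the shared non-duplicate branch body of A's loop: query TA at y, then range-update TB;
-- returns (c, updated TB)
def pvStepA (all : List Int) (sz : Int) (TA TB : List Int) (x y : Int) : Int × List Int :=
  let v : Int := (PySem.List.bisectRight all y : Int) - 1 + sz
  let r := pvQueryLoop TA v 0
  let c := x - r
  let rr : Int := (PySem.List.bisectRight all x : Int) - 1 + sz
  let ll : Int := (PySem.List.bisectRight all (x - c) : Int) + sz
  (c, pvMarkLoop TB ll rr y)

def calculate_eaten_pieces (n : Int) (q : Int) (actions : List (Int × Int × String)) : List Int :=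
  let all := PySem.List.sorted (pvBuildAll q actions) (fun z => z) false
  let sz : Int := 2 * q
  (actions.foldl
    (fun (st : PySem.Set (Int × Int) × List Int × List Int × List Int) act =>
      let was := st.1
      let V := st.2.1
      let H := st.2.2.1
      let results := st.2.2.2
      let x := act.1
      let y := act.2.1
      let t := act.2.2
      if was.contains (x, y) then (was, V, H, results ++ [0])
      else
        let was2 := was.add (x, y)
        if t = "L" then
          -- TA = H, TB = V
          let p := pvStepA all sz H V x y
          (was2, p.2, H, results ++ [p.1])
        else
          -- (x, y) = (y, x); TA = V, TB = H
          let p := pvStepA all sz V H y x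
          (was2, V, p.2, results ++ [p.1]))
    (PySem.Set.empty, List.replicate (2 * (2 * q)).toNat 0,
     List.replicate (2 * (2 * q)).toNat 0, ([] : List Int))).2.2.2

-- ===== PORT B =====
-- rank(v): linear count of first-q coordinates ≤ v
def pvRank (coords : List Int) (v : Int) : Int :=
  coords.foldl (fun r c => if c ≤ v then r + 1 else r) 0

-- coords = []; for i in range(q): coords.append(x); coords.append(y)
def pvBuildCoords (q : Int) (actions : List (Int × Int × String)) : List Int :=
  (PySem.List.pyRange 0 q 1).foldl
    (fun a i =>
      let act := PySem.List.pyGetD actions i (0, 0, "")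
      a ++ [act.1, act.2.1])
    []

-- the shared non-duplicate branch body of B's loop: scan the src update list, then append
-- the new rank-interval update to dst; returns (c, updated dst)
def pvStepB (coords : List Int) (UA UB : List (Int × Int × Int)) (x y : Int) :
    Int × List (Int × Int × Int) :=
  let ry := pvRank coords y
  let r := UA.foldl (fun r u => if (u.1 < ry ∧ ry ≤ u.2.1) ∧ u.2.2 > r then u.2.2 else r) 0
  let c := x - r
  (c, UB ++ [(pvRank coords (x - c), pvRank coords x, y)])

def calculate_eaten_pieces_alt (n : Int) (q : Int) (actions : List (Int × Int × String)) : List Int :=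
  let coords := pvBuildCoords q actions
  (actions.foldl
    (fun (st : PySem.Set (Int × Int) × List (Int × Int × Int) × List (Int × Int × Int) × List Int) act =>
      let was := st.1
      let UV := st.2.1
      let UH := st.2.2.1
      let results := st.2.2.2
      let x := act.1
      let y := act.2.1
      let t := act.2.2
      if was.contains (x, y) then (was, UV, UH, results ++ [0])
      else
        let was2 := was.add (x, y)
        if t = "L" then
          -- src = upd_h, dst = upd_v
          let p := pvStepB coords UH UV x y
          (was2, p.2, UH, results ++ [p.1])
        else
          -- (x, y) = (y, x); src = upd_v, dst = upd_h
          let p := pvStepB coords UV UH y x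
          (was2, UV, p.2, results ++ [p.1]))
    (PySem.Set.empty, ([] : List (Int × Int × Int)), ([] : List (Int × Int × Int)),
     ([] : List Int))).2.2.2

-- ===== PRECONDITION & SPEC =====
-- the coordinate each action queries on: y for 'L' actions (horizontal), x otherwise
def pvQC (a : Int × Int × String) : Int := if a.2.2 = "L" then a.2.1 else a.1

-- Pre_ excludes (i) q > len(actions), where A raises IndexError building `all`, and
-- (ii) q ≥ 1 with some action whose queried coordinate is below the minimum coordinate of
-- the first q actions: there A's bisect returns 0 and the point query starts at internal
-- tree node sz-1 instead of a leaf — an accident of the iterative heap layout that no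
-- re-implementation without that exact layout can reproduce.
def Pre_calculate_eaten_pieces (n : Int) (q : Int) (actions : List (Int × Int × String)) : Prop :=
  q ≤ (actions.length : Int) ∧
  (1 ≤ q → ∀ a ∈ actions, ∃ b ∈ actions.take q.toNat, b.1 ≤ pvQC a ∨ b.2.1 ≤ pvQC a)

instance (n : Int) (q : Int) (actions : List (Int × Int × String)) :
    Decidable (Pre_calculate_eaten_pieces n q actions) := by
  unfold Pre_calculate_eaten_pieces; infer_instance

def pvWitness_calculate_eaten_pieces : Int × Int × (List (Int × Int × String)) :=
  (3, 2, [(1, 2, "L"), (3, 1, "U")])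

def Spec_calculate_eaten_pieces (n : Int) (q : Int) (actions : List (Int × Int × String)) (out : List Int) : Prop := out = calculate_eaten_pieces_alt n q actions
instance (n : Int) (q : Int) (actions : List (Int × Int × String)) (out : List Int) : Decidable (Spec_calculate_eaten_pieces n q actions out) := by unfold Spec_calculate_eaten_pieces; infer_instance

-- ===== CLAIM (what is proved, stated in full; the proofs are below) =====
def Claim_equal_calculate_eaten_pieces : Prop := ∀ (n : Int) (q : Int) (actions : List (Int × Int × String)), Dom_calculate_eaten_pieces n q actions → Pre_calculate_eaten_pieces n q actions → Spec_calculate_eaten_pieces n q actions (calculate_eaten_pieces n q actions)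

-- ===== LEMMAS AND PROOFS =====

-- ---- basic arithmetic bridges ----
theorem pv_fd2 (a : Int) : PySem.Int.floordiv a 2 = a / 2 :=
  PySem.Int.floordiv_eq_ediv_of_pos (by norm_num)

-- ---- the query path (node indices visited by pvQueryLoop) ----
def pvPath (v : Int) : List Nat :=
  if 0 < v then v.toNat :: pvPath (PySem.Int.floordiv v 2) else []
termination_by v.toNat
decreasing_by rw [pv_fd2]; omega

theorem pvPath_nonpos {v : Int} (h : ¬ 0 < v) : pvPath v = [] := by
  rw [pvPath]; simp [h, pv_fd2]

theorem pvPath_cons {v : Int} (h : 0 < v) : pvPath v = v.toNat :: pvPath (v / 2) := by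
  rw [pvPath]; simp [h, pv_fd2]

theorem pvPath_mem_le {v : Int} {w : Nat} (hw : w ∈ pvPath v) : 0 < w ∧ (w : Int) ≤ v := by
  by_cases h : 0 < v
  · rw [pvPath_cons h] at hw
    rcases List.mem_cons.mp hw with h1 | h2
    · subst h1; omega
    · have := pvPath_mem_le h2
      omega
  · rw [pvPath_nonpos h] at hw; cases hw
termination_by v.toNat
decreasing_by omega

theorem pvPath_half_mem {v : Int} {w : Nat} (hw : w ∈ pvPath v) (h1 : 1 < w) :
    w / 2 ∈ pvPath v := by
  by_cases h : 0 < v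
  · rw [pvPath_cons h] at hw ⊢
    rcases List.mem_cons.mp hw with h2 | h2
    · subst h2
      refine List.mem_cons_of_mem _ ?_
      have hv2 : 0 < v / 2 := by omega
      rw [pvPath_cons hv2]
      have : v.toNat / 2 = (v / 2).toNat := by omega
      rw [this]
      exact List.mem_cons_self
    · exact List.mem_cons_of_mem _ (pvPath_half_mem h2 h1)
  · rw [pvPath_nonpos h] at hw; cases hw
termination_by v.toNat
decreasing_by omega

theorem pvPath_child_mem {v : Int} {w : Nat} (hw : w ∈ pvPath v) (hne : w ≠ v.toNat) :
    ∃ a ∈ pvPath v, a / 2 = w ∧ (a = 2 * w ∨ a = 2 * w + 1) := by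
  by_cases h : 0 < v
  · rw [pvPath_cons h] at hw
    rcases List.mem_cons.mp hw with h2 | h2
    · exact absurd h2 hne
    · by_cases hw2 : w = (v / 2).toNat
      · refine ⟨v.toNat, ?_, by omega, by omega⟩
        rw [pvPath_cons h]; exact List.mem_cons_self
      · obtain ⟨a, ha, h3, h4⟩ := pvPath_child_mem h2 hw2
        exact ⟨a, by rw [pvPath_cons h]; exact List.mem_cons_of_mem _ ha, h3, h4⟩
  · rw [pvPath_nonpos h] at hw; cases hw
termination_by v.toNat
decreasing_by omega

theorem pvQueryLoop_eq_foldl (TA : List Int) (v r : Int) :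
    pvQueryLoop TA v r =
      (pvPath v).foldl (fun r (w : Nat) => max r (PySem.List.pyGetD TA (w : Int) 0)) r := by
  by_cases h : 0 < v
  · rw [pvQueryLoop, pvPath_cons h]
    simp only [h, if_true, List.foldl_cons, pv_fd2]
    rw [pvQueryLoop_eq_foldl TA (v / 2)]
    rw [Int.toNat_of_nonneg (le_of_lt h)]
  · rw [pvQueryLoop, pvPath_nonpos h]
    simp [h]
termination_by v.toNat
decreasing_by omega

-- ---- the marked node set of one bottom-up range update ----
def pvMarked (w l r : Int) : Bool :=
  if h : l ≤ r then
    (decide (PySem.Int.mod l 2 = 1 ∧ w = l) || decide (PySem.Int.mod r 2 = 0 ∧ w = r)) ||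
      pvMarked w (PySem.Int.floordiv (l + 1) 2) (PySem.Int.floordiv (r - 1) 2)
  else false
termination_by (r - l + 2).toNat
decreasing_by rw [pv_fd2, pv_fd2]; omega

theorem pvMarked_of_not_le {w l r : Int} (h : ¬ l ≤ r) : pvMarked w l r = false := by
  rw [pvMarked]; simp [h, pv_fd2]

theorem pvMarked_unfold {w l r : Int} (h : l ≤ r) :
    pvMarked w l r =
      ((decide (PySem.Int.mod l 2 = 1 ∧ w = l) || decide (PySem.Int.mod r 2 = 0 ∧ w = r)) ||
        pvMarked w ((l + 1) / 2) ((r - 1) / 2)) := by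
  rw [pvMarked]; simp [h, pv_fd2]

-- getD after set, at an in-range position
theorem pv_getD_set (L : List Int) (i w : Nat) (x : Int) (hw : w < L.length) :
    (L.set i x).getD w 0 = if i = w then x else L.getD w 0 := by
  simp only [List.getD_eq_getElem?_getD, List.getElem?_set]
  by_cases hiw : i = w
  · subst hiw; simp [hw]
  · simp [hiw]

theorem pvMark1_length (TB : List Int) (l y : Int) : (pvMark1 TB l y).length = TB.length := by
  unfold pvMark1; split <;> simp [PySem.List.length_pySetD]

theorem pvMark2_length (TB : List Int) (r y : Int) : (pvMark2 TB r y).length = TB.length := by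
  unfold pvMark2; split <;> simp [PySem.List.length_pySetD]

theorem pvMark1_getD (TB : List Int) (l y : Int) (hl : 0 ≤ l) (w : Nat) (hw : w < TB.length) :
    (pvMark1 TB l y).getD w 0 =
      if PySem.Int.mod l 2 = 1 ∧ (w : Int) = l then max (TB.getD w 0) y else TB.getD w 0 := by
  unfold pvMark1
  by_cases hm : PySem.Int.mod l 2 = 1
  · rw [if_pos hm, PySem.List.pySetD_of_nonneg _ _ hl, pv_getD_set _ _ _ _ hw]
    by_cases hwl : (w : Int) = l
    · rw [if_pos (by omega : l.toNat = w), if_pos ⟨hm, hwl⟩]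
      have hval : PySem.List.pyGetD TB l 0 = TB.getD w 0 := by
        rw [← PySem.List.pyGetD_natCast TB w 0]
        congr 1
        omega
      rw [hval]
    · rw [if_neg (by omega : ¬ l.toNat = w), if_neg (fun hc => hwl hc.2)]
  · rw [if_neg hm, if_neg (fun hc => hm hc.1)]

theorem pvMark2_getD (TB : List Int) (r y : Int) (hr : 0 ≤ r) (w : Nat) (hw : w < TB.length) :
    (pvMark2 TB r y).getD w 0 =
      if PySem.Int.mod r 2 = 0 ∧ (w : Int) = r then max (TB.getD w 0) y else TB.getD w 0 := by
  unfold pvMark2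
  by_cases hm : PySem.Int.mod r 2 = 0
  · rw [if_pos hm, PySem.List.pySetD_of_nonneg _ _ hr, pv_getD_set _ _ _ _ hw]
    by_cases hwl : (w : Int) = r
    · rw [if_pos (by omega : r.toNat = w), if_pos ⟨hm, hwl⟩]
      have hval : PySem.List.pyGetD TB r 0 = TB.getD w 0 := by
        rw [← PySem.List.pyGetD_natCast TB w 0]
        congr 1
        omega
      rw [hval]
    · rw [if_neg (by omega : ¬ r.toNat = w), if_neg (fun hc => hwl hc.2)]
  · rw [if_neg hm, if_neg (fun hc => hm hc.1)]

theorem pvMarkLoop_length (TB : List Int) (l r y : Int) :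
    (pvMarkLoop TB l r y).length = TB.length := by
  by_cases h : l ≤ r
  · rw [pvMarkLoop, dif_pos h, pvMarkLoop_length, pvMark2_length, pvMark1_length]
  · rw [pvMarkLoop, dif_neg h]
termination_by (r - l + 2).toNat
decreasing_by rw [pv_fd2, pv_fd2]; omega

-- pointwise effect of one whole bottom-up range update
theorem pvMarkLoop_getD (TB : List Int) (l r y : Int) (hl : 0 ≤ l ∨ r < l) (w : Nat)
    (hw : w < TB.length) :
    (pvMarkLoop TB l r y).getD w 0 =
      if pvMarked (w : Int) l r then max (TB.getD w 0) y else TB.getD w 0 := by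
  by_cases hlr : l ≤ r
  · have h0 : 0 ≤ l := by
      rcases hl with h | h
      · exact h
      · omega
    have h0r : 0 ≤ r := by omega
    rw [pvMarkLoop, dif_pos hlr, pvMarked_unfold hlr, pv_fd2, pv_fd2]
    have hlen1 : (pvMark1 TB l y).length = TB.length := pvMark1_length TB l y
    have hlen2 : (pvMark2 (pvMark1 TB l y) r y).length = TB.length := by
      rw [pvMark2_length, hlen1]
    have hrec := pvMarkLoop_getD (pvMark2 (pvMark1 TB l y) r y) ((l + 1) / 2) ((r - 1) / 2) y
      (Or.inl (by omega)) w (by omega)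
    rw [hrec]
    have e2 := pvMark2_getD (pvMark1 TB l y) r y h0r w (by omega)
    have e1 := pvMark1_getD TB l y h0 w hw
    rw [e2, e1]
    have hml : PySem.Int.mod l 2 = l % 2 := PySem.Int.mod_eq_emod_of_pos (by norm_num)
    have hmr : PySem.Int.mod r 2 = r % 2 := PySem.Int.mod_eq_emod_of_pos (by norm_num)
    simp only [hml, hmr, Bool.or_eq_true, decide_eq_true_eq]
    split_ifs <;> first | omega | tauto
  · rw [pvMarkLoop, dif_neg hlr, pvMarked_of_not_le hlr]
    simp
termination_by (r - l + 2).toNat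
decreasing_by omega

-- ---- max-folds over an update list ----
def pvMfold (p : Int × Int × Int → Bool) (U : List (Int × Int × Int)) : Int :=
  U.foldl (fun r u => if p u ∧ u.2.2 > r then u.2.2 else r) 0

theorem pvMfold_append (p : Int × Int × Int → Bool) (U : List (Int × Int × Int))
    (u : Int × Int × Int) :
    pvMfold p (U ++ [u]) = if p u then max (pvMfold p U) u.2.2 else pvMfold p U := by
  unfold pvMfold
  rw [List.foldl_append]
  simp only [List.foldl_cons, List.foldl_nil]
  set m := List.foldl (fun r u => if p u = true ∧ u.2.2 > r then u.2.2 else r) 0 U with hm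
  by_cases hp : p u = true
  · rw [if_pos hp]
    by_cases hgt : u.2.2 > m
    · rw [if_pos ⟨hp, hgt⟩]; omega
    · rw [if_neg (fun hc => hgt hc.2)]; omega
  · rw [if_neg hp, if_neg (fun hc => hp hc.1)]

theorem pvMfold_congr (p p' : Int × Int × Int → Bool) (U : List (Int × Int × Int))
    (h : ∀ u ∈ U, p u = p' u) : pvMfold p U = pvMfold p' U := by
  unfold pvMfold
  exact PySem.List.foldl_congr_mem U _ _ 0 (fun acc u hu => by rw [h u hu])

theorem pv_foldl_max_zero (P : List Nat) (f : Nat → Int) (h : ∀ w ∈ P, f w = 0) :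
    P.foldl (fun r w => max r (f w)) 0 = 0 := by
  induction P with
  | nil => rfl
  | cons w P ih =>
    simp only [List.foldl_cons, h w List.mem_cons_self]
    have : max (0 : Int) 0 = 0 := by omega
    rw [this]
    exact ih (fun w hw => h w (List.mem_cons_of_mem _ hw))

theorem pv_foldl_max_bumped (P : List Nat) (f g : Nat → Int) (S : Nat → Bool) (y : Int)
    (h : ∀ w ∈ P, g w = if S w then max (f w) y else f w) (a : Int) :
    P.foldl (fun r w => max r (g w)) (max a y) =
      max (P.foldl (fun r w => max r (f w)) a) y := by
  induction P generalizing a with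
  | nil => rfl
  | cons w P ih =>
    simp only [List.foldl_cons]
    have hw := h w List.mem_cons_self
    have hstep : max (max a y) (g w) = max (max a (f w)) y := by
      rw [hw]; split_ifs <;> omega
    rw [hstep]
    exact ih (fun w hw => h w (List.mem_cons_of_mem _ hw)) (max a (f w))

theorem pv_foldl_max_bump (P : List Nat) (f g : Nat → Int) (S : Nat → Bool) (y : Int)
    (h : ∀ w ∈ P, g w = if S w then max (f w) y else f w) (a : Int) :
    P.foldl (fun r w => max r (g w)) a =
      if P.any S then max (P.foldl (fun r w => max r (f w)) a) y
      else P.foldl (fun r w => max r (f w)) a := by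
  induction P generalizing a with
  | nil => simp
  | cons w P ih =>
    have hw := h w List.mem_cons_self
    have htail : ∀ w ∈ P, g w = if S w then max (f w) y else f w :=
      fun w hw => h w (List.mem_cons_of_mem _ hw)
    by_cases hS : S w
    · simp only [List.foldl_cons, List.any_cons, hS, Bool.true_or, if_true]
      have hstep : max a (g w) = max (max a (f w)) y := by
        rw [hw]; simp only [hS, if_true]; omega
      rw [hstep]
      exact pv_foldl_max_bumped P f g S y htail (max a (f w))
    · simp only [List.foldl_cons, List.any_cons, hS, Bool.false_or]
      have hstep : max a (g w) = max a (f w) := by rw [hw]; simp [hS]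
      rw [hstep]
      exact ih htail (max a (f w))

-- exchanging "max over the path of a max over updates" into "max over updates guarded by
-- the path hitting the update's marked set"
theorem pv_exchange (U : List (Int × Int × Int)) (P : List Nat) (f : Nat → Int)
    (m : Nat → Int × Int × Int → Bool) (hf : ∀ w ∈ P, f w = pvMfold (m w) U) :
    P.foldl (fun r w => max r (f w)) 0 = pvMfold (fun u => P.any (fun w => m w u)) U := by
  induction U using List.reverseRecOn generalizing f with
  | nil => exact pv_foldl_max_zero P f hf
  | append_singleton U u ih =>
    have hf' : ∀ w ∈ P, f w = if m w u then max (pvMfold (m w) U) u.2.2 else pvMfold (m w) U :=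
      fun w hw => by rw [hf w hw, pvMfold_append]
    rw [pv_foldl_max_bump P (fun w => pvMfold (m w) U) f (fun w => m w u) u.2.2 hf' 0]
    rw [ih (fun w => pvMfold (m w) U) (fun w _ => rfl)]
    rw [pvMfold_append]

-- ---- the cover lemma: the path from v hits the marked set of (l, r) iff the path meets
-- the interval [l, r] ----
theorem pv_cover (k : Nat) : ∀ l r v : Int, (r - l + 2).toNat ≤ k → 0 < v → 1 ≤ l →
    r ≤ 2 * v →
    ((pvPath v).any (fun (w : Nat) => pvMarked (w : Int) l r) = true ↔
      ∃ w ∈ pvPath v, l ≤ (w : Int) ∧ (w : Int) ≤ r) := by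
  induction k with
  | zero =>
    intro l r v hk hv hl hr
    have hlr : ¬ l ≤ r := by omega
    simp only [pvMarked_of_not_le hlr, List.any_eq_true]
    constructor
    · rintro ⟨w, _, h⟩; cases h
    · rintro ⟨w, _, h1, h2⟩; omega
  | succ k ih =>
    intro l r v hk hv hl hr
    by_cases hlr : l ≤ r
    · have hml : PySem.Int.mod l 2 = l % 2 := PySem.Int.mod_eq_emod_of_pos (by norm_num)
      have hmr : PySem.Int.mod r 2 = r % 2 := PySem.Int.mod_eq_emod_of_pos (by norm_num)
      simp only [pvMarked_unfold hlr, hml, hmr, Bool.or_eq_true, decide_eq_true_eq,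
        List.any_eq_true]
      have hih := ih ((l + 1) / 2) ((r - 1) / 2) v (by omega) hv (by omega) (by omega)
      constructor
      · rintro ⟨w, hwmem, hcase⟩
        rcases hcase with (⟨hq1, hwl⟩ | ⟨hq2, hwr⟩) | hrec
        · exact ⟨w, hwmem, by omega, by omega⟩
        · exact ⟨w, hwmem, by omega, by omega⟩
        · have hany : (pvPath v).any (fun (w : Nat) => pvMarked (w : Int) ((l + 1) / 2) ((r - 1) / 2)) = true :=
            List.any_eq_true.mpr ⟨w, hwmem, hrec⟩
          obtain ⟨b, hbmem, hb1, hb2⟩ := hih.mp hany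
          have hbv := pvPath_mem_le hbmem
          have hbne : b ≠ v.toNat := by omega
          obtain ⟨a, hamem, ha2, ha3⟩ := pvPath_child_mem hbmem hbne
          exact ⟨a, hamem, by omega, by omega⟩
      · rintro ⟨w, hwmem, hw1, hw2⟩
        by_cases hcl : l % 2 = 1 ∧ (w : Int) = l
        · exact ⟨w, hwmem, Or.inl (Or.inl hcl)⟩
        · by_cases hcr : r % 2 = 0 ∧ (w : Int) = r
          · exact ⟨w, hwmem, Or.inl (Or.inr hcr)⟩
          · have hwpos := pvPath_mem_le hwmem
            have hw1lt : 1 < w := by omega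
            have hmem2 := pvPath_half_mem hwmem hw1lt
            have hany := hih.mpr ⟨w / 2, hmem2, by omega, by omega⟩
            obtain ⟨w', hw'mem, hw'⟩ := List.any_eq_true.mp hany
            exact ⟨w', hw'mem, Or.inr hw'⟩
    · have hlr2 : ¬ l ≤ r := hlr
      simp only [pvMarked_of_not_le hlr2, List.any_eq_true]
      constructor
      · rintro ⟨w, _, h⟩; cases h
      · rintro ⟨w, _, h1, h2⟩; omega

-- the per-update bridge, leaf-localized: for a query starting at leaf ry - 1 + 2q
theorem pv_bridge (q ral rah ry : Int) (h1 : 0 ≤ ral) (h2 : ral ≤ 2 * q) (h3 : 0 ≤ rah)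
    (h4 : rah ≤ 2 * q) (h5 : 1 ≤ ry) (h6 : ry ≤ 2 * q) (hq : 1 ≤ q) :
    (pvPath (ry - 1 + 2 * q)).any (fun (w : Nat) => pvMarked (w : Int) (ral + 2 * q) (rah - 1 + 2 * q)) =
      decide (ral < ry ∧ ry ≤ rah) := by
  have hv : 0 < ry - 1 + 2 * q := by omega
  have hcov := pv_cover ((rah - 1 + 2 * q) - (ral + 2 * q) + 2).toNat (ral + 2 * q)
    (rah - 1 + 2 * q) (ry - 1 + 2 * q) (le_refl _) hv (by omega) (by omega)
  rw [Bool.eq_iff_iff, hcov]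
  simp only [decide_eq_true_eq]
  constructor
  · rintro ⟨w, hwmem, h1, h2⟩
    rw [pvPath_cons hv] at hwmem
    rcases List.mem_cons.mp hwmem with he | ht
    · subst he; constructor <;> omega
    · have := pvPath_mem_le ht
      omega
  · rintro ⟨hlt, hle⟩
    refine ⟨(ry - 1 + 2 * q).toNat, ?_, by omega, by omega⟩
    rw [pvPath_cons hv]
    exact List.mem_cons_self

-- ---- build equalities and the bisect/rank bridge ----
theorem pvFlat_len (l : List (Int × Int × String)) :
    (l.flatMap (fun a => [a.1, a.2.1])).length = 2 * l.length := by
  induction l with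
  | nil => rfl
  | cons a l ih => simp only [List.flatMap_cons, List.length_append, ih, List.length_cons]; simp; omega

theorem pvBuildCoords_eq_flat (q : Int) (actions : List (Int × Int × String))
    (hq : q ≤ (actions.length : Int)) :
    pvBuildCoords q actions = (actions.take q.toNat).flatMap (fun a => [a.1, a.2.1]) := by
  by_cases hq0 : 0 ≤ q
  · have haux : ∀ m : Nat, m ≤ actions.length →
        pvBuildCoords (m : Int) actions = (actions.take m).flatMap (fun a => [a.1, a.2.1]) := by
      intro m
      induction m with
      | zero =>
        intro _
        unfold pvBuildCoords
        rw [PySem.List.pyRange_one_eq_nil (by norm_num)]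
        rfl
      | succ m ih =>
        intro hm
        unfold pvBuildCoords at ih ⊢
        have h1 : ((m + 1 : Nat) : Int) = (m : Int) + 1 := by push_cast; ring
        rw [h1, PySem.List.pyRange_one_succ_right (by exact_mod_cast Nat.zero_le m),
          List.foldl_append, ih (by omega)]
        simp only [List.foldl_cons, List.foldl_nil]
        have hmlt : m < actions.length := by omega
        have hact : PySem.List.pyGetD actions (m : Int) (0, 0, "") = actions[m] := by
          rw [PySem.List.pyGetD_natCast, List.getD_eq_getElem _ _ hmlt]
        rw [hact]
        conv_rhs => rw [List.take_add_one, List.getElem?_eq_getElem hmlt]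
        rw [List.flatMap_append]
        simp
    have hqq : q = (q.toNat : Int) := by omega
    rw [hqq]
    exact haux q.toNat (by omega)
  · unfold pvBuildCoords
    rw [PySem.List.pyRange_one_eq_nil (by omega)]
    have : q.toNat = 0 := by omega
    rw [this]
    rfl

theorem pvBuild_eq (q : Int) (actions : List (Int × Int × String))
    (hq : q ≤ (actions.length : Int)) :
    pvBuildAll q actions = pvBuildCoords q actions := by
  rw [pvBuildCoords_eq_flat q actions hq]
  by_cases hq0 : 0 ≤ q
  · have haux : ∀ m : Nat, (m : Int) ≤ q → m ≤ actions.length →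
        (PySem.List.pyRange 0 (m : Int) 1).foldl
          (fun a i =>
            let act := PySem.List.pyGetD actions i (0, 0, "")
            PySem.List.pySetD (PySem.List.pySetD a (2 * i) act.1) (2 * i + 1) act.2.1)
          (List.replicate (2 * q).toNat 0) =
        (actions.take m).flatMap (fun a => [a.1, a.2.1]) ++
          List.replicate ((2 * q).toNat - 2 * m) 0 := by
      intro m
      induction m with
      | zero =>
        intro _ _
        rw [PySem.List.pyRange_one_eq_nil (by norm_num)]
        rfl
      | succ m ih =>
        intro hmq hm
        have h1 : ((m + 1 : Nat) : Int) = (m : Int) + 1 := by push_cast; ring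
        rw [h1, PySem.List.pyRange_one_succ_right (by exact_mod_cast Nat.zero_le m),
          List.foldl_append, ih (by omega) (by omega)]
        simp only [List.foldl_cons, List.foldl_nil]
        have hmlt : m < actions.length := by omega
        have hact : PySem.List.pyGetD actions (m : Int) (0, 0, "") = actions[m] := by
          rw [PySem.List.pyGetD_natCast, List.getD_eq_getElem _ _ hmlt]
        rw [hact]
        set FL := (actions.take m).flatMap (fun a => [a.1, a.2.1]) with hFL
        have hfl : FL.length = 2 * m := by
          rw [hFL, pvFlat_len, List.length_take]
          omega
        have hR : (2 * q).toNat - 2 * m = ((2 * q).toNat - 2 * (m + 1)) + 1 + 1 := by omega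
        rw [PySem.List.pySetD_of_nonneg _ _ (by omega : (0:Int) ≤ 2 * (m:Int))]
        have ht1 : (2 * (m : Int)).toNat = 2 * m := by omega
        rw [ht1, hR, List.replicate_succ, List.replicate_succ, List.set_append]
        rw [if_neg (by omega)]
        have hs0 : (2 * m) - FL.length = 0 := by omega
        rw [hfl]
        simp only [Nat.sub_self, List.set_cons_zero]
        rw [PySem.List.pySetD_of_nonneg _ _ (by omega : (0:Int) ≤ 2 * (m:Int) + 1)]
        have ht2 : (2 * (m : Int) + 1).toNat = 2 * m + 1 := by omega
        rw [ht2, List.set_append, if_neg (by omega), hfl]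
        have hs1 : (2 * m + 1) - (2 * m) = 1 := by omega
        rw [hs1]
        simp only [List.set_cons_succ, List.set_cons_zero]
        conv_rhs => rw [List.take_add_one, List.getElem?_eq_getElem hmlt]
        rw [List.flatMap_append]
        simp [hFL]
    unfold pvBuildAll
    have hqq : q = (q.toNat : Int) := by omega
    have hrange : PySem.List.pyRange 0 q 1 = PySem.List.pyRange 0 (q.toNat : Int) 1 := by
      rw [← hqq]
    rw [hrange, haux q.toNat (by omega) (by omega)]
    have : (2 * q).toNat - 2 * q.toNat = 0 := by omega
    rw [this]
    simp
  · unfold pvBuildAll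
    rw [PySem.List.pyRange_one_eq_nil (by omega)]
    have h2 : (2 * q).toNat = 0 := by omega
    have h3 : q.toNat = 0 := by omega
    rw [h2, h3]
    rfl

theorem pvRank_eq_countP (coords : List Int) (v : Int) :
    pvRank coords v = (coords.countP (fun c => decide (c ≤ v)) : Int) := by
  unfold pvRank
  have h := PySem.List.foldl_count_if (fun c => decide (c ≤ v)) coords 0
  simp only [decide_eq_true_eq] at h
  rw [h]
  omega

theorem pvBis_eq_countP (xs : List Int) (v : Int) :
    (PySem.List.bisectRight (PySem.List.sorted xs (fun z => z) false) v : Int) =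
      (xs.countP (fun c => decide (c ≤ v)) : Int) := by
  set ys := PySem.List.sorted xs (fun z => z) false with hys
  have hpw : ys.Pairwise (fun a b => a ≤ b) := PySem.List.sorted_pairwise xs (fun z => z)
  obtain ⟨hk1, hk2, hk3⟩ := PySem.List.bisectRight_spec ys v hpw
  set k := PySem.List.bisectRight ys v with hk
  have hcy : ys.countP (fun c => decide (c ≤ v)) = k := by
    conv_lhs => rw [← List.take_append_drop k ys]
    rw [List.countP_append]
    have h1 : (ys.take k).countP (fun c => decide (c ≤ v)) = k := by
      rw [List.countP_eq_length.mpr ?_]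
      · rw [List.length_take]; omega
      · intro a ha
        obtain ⟨j, hj, hja⟩ := List.mem_iff_getElem.mp ha
        have hjk : j < k := by
          simp [List.length_take] at hj
          omega
        rw [List.getElem_take] at hja
        subst hja
        simp only [decide_eq_true_eq]
        exact hk2 j (by omega) hjk
    have h2 : (ys.drop k).countP (fun c => decide (c ≤ v)) = 0 := by
      rw [List.countP_eq_zero.mpr ?_]
      intro a ha
      obtain ⟨j, hj, hja⟩ := List.mem_iff_getElem.mp ha
      rw [List.getElem_drop] at hja
      subst hja
      simp only [decide_eq_true_eq]
      have hlt := hk3 (k + j) (by simp at hj; omega) (by omega)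
      omega
    omega
  have hperm : ys.Perm xs := PySem.List.sorted_perm xs (fun z => z) false
  rw [← hperm.countP_eq (fun c => decide (c ≤ v)), hcy]

theorem pvBis_eq_rank (q : Int) (actions : List (Int × Int × String))
    (hq : q ≤ (actions.length : Int)) (v : Int) :
    (PySem.List.bisectRight (PySem.List.sorted (pvBuildAll q actions) (fun z => z) false) v : Int) =
      pvRank (pvBuildCoords q actions) v := by
  rw [pvBis_eq_countP, pvRank_eq_countP, pvBuild_eq q actions hq]

theorem pvCoords_length (q : Int) (actions : List (Int × Int × String))
    (hq : q ≤ (actions.length : Int)) :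
    ((pvBuildCoords q actions).length : Int) = max (2 * q) 0 := by
  rw [pvBuildCoords_eq_flat q actions hq, pvFlat_len, List.length_take]
  omega

theorem pvRank_bounds (coords : List Int) (v : Int) :
    0 ≤ pvRank coords v ∧ pvRank coords v ≤ (coords.length : Int) := by
  rw [pvRank_eq_countP]
  have := List.countP_le_length (p := fun c => decide (c ≤ v)) (l := coords)
  omega

-- ---- the coupling invariant between one tree of A and one update list of B ----
def pvInv (q : Int) (T : List Int) (U : List (Int × Int × Int)) : Prop :=
  T.length = (2 * (2 * q)).toNat ∧
  ∀ w : Nat, w < T.length →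
    T.getD w 0 = pvMfold (fun u => pvMarked (w : Int) (u.1 + 2 * q) (u.2.1 - 1 + 2 * q)) U

def pvBnd (q : Int) (U : List (Int × Int × Int)) : Prop :=
  ∀ u ∈ U, 0 ≤ u.1 ∧ u.1 ≤ max (2 * q) 0 ∧ 0 ≤ u.2.1 ∧ u.2.1 ≤ max (2 * q) 0

theorem pvUpd_inv (q : Int) (TB : List Int) (UB : List (Int × Int × Int)) (hB : pvInv q TB UB)
    (rl rh yv : Int) (hl : 0 ≤ rl + 2 * q ∨ rh - 1 + 2 * q < rl + 2 * q) :
    pvInv q (pvMarkLoop TB (rl + 2 * q) (rh - 1 + 2 * q) yv) (UB ++ [(rl, rh, yv)]) := by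
  constructor
  · rw [pvMarkLoop_length]
    exact hB.1
  · intro w hw
    rw [pvMarkLoop_length] at hw
    rw [pvMarkLoop_getD TB _ _ yv hl w hw, pvMfold_append, ← hB.2 w hw]

-- one non-duplicate step: equal results and preserved invariant
theorem pvStep_eq (q : Int) (actions : List (Int × Int × String))
    (hq : q ≤ (actions.length : Int)) (TA TB : List Int) (UA UB : List (Int × Int × Int))
    (hA : pvInv q TA UA) (hB : pvInv q TB UB) (bA : pvBnd q UA) (bB : pvBnd q UB)
    (x y : Int) (hy : 1 ≤ q → 1 ≤ pvRank (pvBuildCoords q actions) y) :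
    (pvStepA (PySem.List.sorted (pvBuildAll q actions) (fun z => z) false) (2 * q) TA TB x y).1 =
      (pvStepB (pvBuildCoords q actions) UA UB x y).1 ∧
    pvInv q (pvStepA (PySem.List.sorted (pvBuildAll q actions) (fun z => z) false) (2 * q) TA TB x y).2
      (pvStepB (pvBuildCoords q actions) UA UB x y).2 ∧
    pvBnd q (pvStepB (pvBuildCoords q actions) UA UB x y).2 := by
  set all := PySem.List.sorted (pvBuildAll q actions) (fun z => z) false with hall
  set coords := pvBuildCoords q actions with hco
  have hbis : ∀ z : Int, (PySem.List.bisectRight all z : Int) = pvRank coords z :=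
    fun z => pvBis_eq_rank q actions hq z
  have hclen : (coords.length : Int) = max (2 * q) 0 := pvCoords_length q actions hq
  have hcnil : q ≤ 0 → coords = [] := by
    intro h
    have hl0 : coords.length = 0 := by omega
    exact List.length_eq_zero_iff.mp hl0
  set ry := pvRank coords y with hry
  have hryb := pvRank_bounds coords y
  have hry0 : q ≤ 0 → ry = 0 := by
    intro h
    rw [hry, hcnil h]
    rfl
  -- the point query of A equals the guarded scan of B
  have hEx : pvQueryLoop TA (ry - 1 + 2 * q) 0 =
      pvMfold (fun u => decide (u.1 < ry ∧ ry ≤ u.2.1)) UA := by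
    refine (pvQueryLoop_eq_foldl TA _ 0).trans ?_
    have hf : ∀ w ∈ pvPath (ry - 1 + 2 * q),
        (fun (w : Nat) => PySem.List.pyGetD TA (w : Int) 0) w =
          pvMfold (fun u => pvMarked (w : Int) (u.1 + 2 * q) (u.2.1 - 1 + 2 * q)) UA := by
      intro w hw
      have hwle := pvPath_mem_le hw
      have hlen := hA.1
      have hwlt : w < TA.length := by
        by_cases hq1 : 1 ≤ q
        · omega
        · rw [pvPath_nonpos (by have := hry0 (by omega); omega)] at hw
          cases hw
      have hcell := hA.2 w hwlt
      simpa [PySem.List.pyGetD_natCast] using hcell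
    refine (pv_exchange UA (pvPath (ry - 1 + 2 * q))
      (fun (w : Nat) => PySem.List.pyGetD TA (w : Int) 0)
      (fun (w : Nat) u => pvMarked (w : Int) (u.1 + 2 * q) (u.2.1 - 1 + 2 * q)) hf).trans ?_
    apply pvMfold_congr
    intro u hu
    obtain ⟨b1, b2, b3, b4⟩ := bA u hu
    by_cases hq1 : 1 ≤ q
    · exact pv_bridge q u.1 u.2.1 ry b1 (by omega) b3 (by omega) (hy hq1) (by omega) hq1
    · have h0 := hry0 (by omega)
      rw [pvPath_nonpos (by omega)]
      simp only [List.any_nil]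
      have hns : ¬ (u.1 < ry ∧ ry ≤ u.2.1) := by omega
      simp [hns]
  have hBfold : pvMfold (fun u => decide (u.1 < ry ∧ ry ≤ u.2.1)) UA =
      UA.foldl (fun r u => if (u.1 < ry ∧ ry ≤ u.2.1) ∧ u.2.2 > r then u.2.2 else r) 0 := by
    unfold pvMfold
    apply PySem.List.foldl_congr_mem
    intro acc u _
    simp
  have heq : pvQueryLoop TA ((PySem.List.bisectRight all y : Int) - 1 + 2 * q) 0 =
      UA.foldl (fun r u => if (u.1 < ry ∧ ry ≤ u.2.1) ∧ u.2.2 > r then u.2.2 else r) 0 := by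
    rw [hbis y, ← hry]
    exact hEx.trans hBfold
  refine ⟨?_, ?_, ?_⟩
  · simp only [pvStepA, pvStepB]
    rw [heq, ← hry]
  · simp only [pvStepA, pvStepB]
    rw [heq, ← hry]
    simp only [hbis]
    exact pvUpd_inv q TB UB hB _ _ y (by
      by_cases hq0 : 0 ≤ q
      · left
        have := pvRank_bounds coords (x - (x - UA.foldl (fun r u => if (u.1 < ry ∧ ry ≤ u.2.1) ∧ u.2.2 > r then u.2.2 else r) 0))
        omega
      · right
        have h0 := hcnil (by omega)
        have r1 := pvRank_bounds coords (x - (x - UA.foldl (fun r u => if (u.1 < ry ∧ ry ≤ u.2.1) ∧ u.2.2 > r then u.2.2 else r) 0))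
        have r2 := pvRank_bounds coords x
        omega)
  · simp only [pvStepB]
    rw [← hry]
    intro u hu
    rcases List.mem_append.mp hu with hold | hnew
    · exact bB u hold
    · have r1 := pvRank_bounds coords (x - (x - UA.foldl (fun r u => if (u.1 < ry ∧ ry ≤ u.2.1) ∧ u.2.2 > r then u.2.2 else r) 0))
      have r2 := pvRank_bounds coords x
      simp only [List.mem_singleton] at hnew
      subst hnew
      refine ⟨by simpa using r1.1, ?_, by simpa using r2.1, ?_⟩ <;> · simp only []; omega

-- the main loop: processing any suffix of actions from coupled states gives equal results
theorem pvLoop_eq (q : Int) (actions : List (Int × Int × String))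
    (hq : q ≤ (actions.length : Int)) :
    ∀ (suf : List (Int × Int × String)),
      (∀ a ∈ suf, 1 ≤ q → 1 ≤ pvRank (pvBuildCoords q actions) (pvQC a)) →
      ∀ (was : PySem.Set (Int × Int)) (V H : List Int) (UV UH : List (Int × Int × Int))
        (res : List Int),
        pvInv q V UV → pvInv q H UH → pvBnd q UV → pvBnd q UH →
        (suf.foldl
          (fun (st : PySem.Set (Int × Int) × List Int × List Int × List Int) act =>
            if st.1.contains (act.1, act.2.1) then (st.1, st.2.1, st.2.2.1, st.2.2.2 ++ [0])
            else if act.2.2 = "L" then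
              (st.1.add (act.1, act.2.1),
               (pvStepA (PySem.List.sorted (pvBuildAll q actions) (fun z => z) false) (2 * q)
                  st.2.2.1 st.2.1 act.1 act.2.1).2, st.2.2.1,
               st.2.2.2 ++ [(pvStepA (PySem.List.sorted (pvBuildAll q actions) (fun z => z) false)
                  (2 * q) st.2.2.1 st.2.1 act.1 act.2.1).1])
            else
              (st.1.add (act.1, act.2.1), st.2.1,
               (pvStepA (PySem.List.sorted (pvBuildAll q actions) (fun z => z) false) (2 * q)
                  st.2.1 st.2.2.1 act.2.1 act.1).2,
               st.2.2.2 ++ [(pvStepA (PySem.List.sorted (pvBuildAll q actions) (fun z => z) false)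
                  (2 * q) st.2.1 st.2.2.1 act.2.1 act.1).1]))
          (was, V, H, res)).2.2.2 =
        (suf.foldl
          (fun (st : PySem.Set (Int × Int) × List (Int × Int × Int) × List (Int × Int × Int) × List Int) act =>
            if st.1.contains (act.1, act.2.1) then (st.1, st.2.1, st.2.2.1, st.2.2.2 ++ [0])
            else if act.2.2 = "L" then
              (st.1.add (act.1, act.2.1),
               (pvStepB (pvBuildCoords q actions) st.2.2.1 st.2.1 act.1 act.2.1).2, st.2.2.1,
               st.2.2.2 ++ [(pvStepB (pvBuildCoords q actions) st.2.2.1 st.2.1 act.1 act.2.1).1])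
            else
              (st.1.add (act.1, act.2.1), st.2.1,
               (pvStepB (pvBuildCoords q actions) st.2.1 st.2.2.1 act.2.1 act.1).2,
               st.2.2.2 ++ [(pvStepB (pvBuildCoords q actions) st.2.1 st.2.2.1 act.2.1 act.1).1]))
          (was, UV, UH, res)).2.2.2 := by
  intro suf
  induction suf with
  | nil => intro _ was V H UV UH res _ _ _ _; rfl
  | cons a suf ih =>
    intro hsuf was V H UV UH res hV hH bV bH
    simp only [List.foldl_cons]
    by_cases hdup : was.contains (a.1, a.2.1) = true
    · simp only [hdup, if_true]
      exact ih (fun b hb => hsuf b (List.mem_cons_of_mem _ hb)) was V H UV UH (res ++ [0])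
        hV hH bV bH
    · simp only [hdup, if_false, Bool.false_eq_true]
      by_cases ht : a.2.2 = "L"
      · simp only [ht, if_true]
        have hy : 1 ≤ q → 1 ≤ pvRank (pvBuildCoords q actions) a.2.1 := by
          intro h1
          have := hsuf a List.mem_cons_self h1
          rwa [pvQC, if_pos ht] at this
        obtain ⟨hc, hinv, hbnd⟩ := pvStep_eq q actions hq H V UH UV hH hV bH bV a.1 a.2.1 hy
        rw [hc]
        exact ih (fun b hb => hsuf b (List.mem_cons_of_mem _ hb)) (was.add (a.1, a.2.1)) _ H _ UH
          (res ++ [(pvStepB (pvBuildCoords q actions) UH UV a.1 a.2.1).1]) hinv hH hbnd bH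
      · simp only [ht, if_false]
        have hy : 1 ≤ q → 1 ≤ pvRank (pvBuildCoords q actions) a.1 := by
          intro h1
          have := hsuf a List.mem_cons_self h1
          rwa [pvQC, if_neg ht] at this
        obtain ⟨hc, hinv, hbnd⟩ := pvStep_eq q actions hq V H UV UH hV hH bV bH a.2.1 a.1 hy
        rw [hc]
        exact ih (fun b hb => hsuf b (List.mem_cons_of_mem _ hb)) (was.add (a.1, a.2.1)) V _ UV _
          (res ++ [(pvStepB (pvBuildCoords q actions) UV UH a.2.1 a.1).1]) hV hinv bV hbnd

-- ===== VERDICT (by name: the statement is the Claim_ definition above) =====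
theorem calculate_eaten_pieces_spec : Claim_equal_calculate_eaten_pieces := by
  intro n q actions hdom hpre
  unfold Spec_calculate_eaten_pieces
  unfold calculate_eaten_pieces calculate_eaten_pieces_alt
  have hq := hpre.1
  have hqc : ∀ a ∈ actions, 1 ≤ q → 1 ≤ pvRank (pvBuildCoords q actions) (pvQC a) := by
    intro a ha h1
    obtain ⟨b, hb, hble⟩ := hpre.2 h1 a ha
    rw [pvRank_eq_countP]
    have hmem : ∃ c ∈ pvBuildCoords q actions, c ≤ pvQC a := by
      rw [pvBuildCoords_eq_flat q actions hq]
      rcases hble with h | h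
      · exact ⟨b.1, List.mem_flatMap.mpr ⟨b, hb, by simp⟩, h⟩
      · exact ⟨b.2.1, List.mem_flatMap.mpr ⟨b, hb, by simp⟩, h⟩
    obtain ⟨c, hc, hcle⟩ := hmem
    have : 0 < (pvBuildCoords q actions).countP (fun c => decide (c ≤ pvQC a)) :=
      List.countP_pos_iff.mpr ⟨c, hc, by simpa using hcle⟩
    omega
  have hInv0 : pvInv q (List.replicate (2 * (2 * q)).toNat 0) ([] : List (Int × Int × Int)) := by
    constructor
    · simp
    · intro w hw
      simp only [List.length_replicate] at hw
      rw [List.getD_replicate _ hw]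
      rfl
  have hBnd0 : pvBnd q ([] : List (Int × Int × Int)) := by
    intro u hu
    cases hu
  exact pvLoop_eq q actions hq actions hqc PySem.Set.empty _ _ _ _ [] hInv0 hInv0 hBnd0 hBnd0
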